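-- pv_equiv track=rewrite | github.com/yashitanamdeo/geeks-for-geeks | Medium/satisfy_the_equation.py | satisfyEqn
-- ===== SOURCE A (Python) =====
-- def satisfyEqn(A, N):
--     # code here
--     mp = {}
--     ans = [999, 999, 999, 999]
--     temp = [None]
--     for i in range(N):
--         for j in range(i+1, N):
--             if (A[i]+A[j]) not in mp:
--                 mp[A[i] + A[j]] = i, j
--             else:
--                 temp[0] = mp[A[i] + A[j]]
--                 a, b, c, d = temp[0][0], temp[0][1], i, j
--                 if a == c or a == d or b == c or b == d:
--                     continue
--                 elif a < ans[0]:
--                     ans[0], ans[1], ans[2], ans[3] = a, b, c, d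
--                 elif a == ans[0]:
--                     if b < ans[1]:
--                         ans[0], ans[1], ans[2], ans[3] = a, b, c, d
--                     elif b == ans[1]:
--                         if c < ans[2]:
--                             ans[0], ans[1], ans[2], ans[3] = a, b, c, d
--                         elif c == ans[2]:
--                             if d < ans[3]:
--                                 ans[0], ans[1], ans[2], ans[3] = a, b, c, d
--                             else:
--                                 continue
--     if ans == [999, 999, 999, 999]:
--         ans = [-1, -1, -1, -1]
--     return ans
-- ===== SOURCE B (Python) =====
-- def satisfyEqn(A, N):
--     # Group-by-sum, two-phase algorithm: first bucket EVERY index pair under its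
--     # pair-sum, then scan each bucket once, pairing its earliest pair (the anchor)
--     # with each later pair of the same sum and keeping the lexicographically
--     # smallest disjoint quadruple (running minimum, same initial value as A).
--     groups = {}
--     for i in range(N):
--         for j in range(i + 1, N):
--             groups.setdefault(A[i] + A[j], []).append((i, j))
--     best = (999, 999, 999, 999)
--     for pairs in groups.values():
--         a, b = pairs[0]
--         for c, d in pairs[1:]:
--             if a != c and a != d and b != c and b != d:
--                 cand = (a, b, c, d)
--                 if cand < best:
--                     best = cand
--     return list(best) if best != (999, 999, 999, 999) else [-1, -1, -1, -1]
-- ===== Notes on version B (the rewrite author's own statement) =====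
-- stated objective: alternative
-- what changed: Replaces A's single interleaved pass (first-pair-per-sum dict, anchor lookup and lexicographic elif-tower all inside one nested loop) by a group-by-sum two-phase algorithm: bucket every index pair under its pair-sum into lists, then scan each bucket pairing its earliest pair with each later pair of the same sum, keeping the running lexicographic minimum.
import Mathlib
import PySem

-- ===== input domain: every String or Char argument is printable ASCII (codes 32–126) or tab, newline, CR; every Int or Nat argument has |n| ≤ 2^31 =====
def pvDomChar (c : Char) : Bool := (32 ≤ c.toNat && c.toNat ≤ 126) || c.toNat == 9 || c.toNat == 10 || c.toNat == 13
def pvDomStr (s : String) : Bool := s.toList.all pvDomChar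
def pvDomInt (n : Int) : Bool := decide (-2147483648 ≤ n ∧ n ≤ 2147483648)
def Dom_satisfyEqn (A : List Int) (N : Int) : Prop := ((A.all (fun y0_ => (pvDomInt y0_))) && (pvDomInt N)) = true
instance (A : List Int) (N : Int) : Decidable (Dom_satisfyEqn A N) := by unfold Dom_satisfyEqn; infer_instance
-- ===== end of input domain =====

-- B replaces A's single interleaved pass (first-pair-per-sum dict + elif-tower update)
-- by a group-by-sum two-phase algorithm: bucket every index pair under its pair-sum,
-- then scan each bucket pairing its earliest pair with each later one; an alternative
-- decomposition of the same O(N^2) task, not claimed faster.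

-- ===== PORT A =====
-- the body of A's inner loop: dict lookup/insert plus the lexicographic elif-tower update
def satisfyEqnStep (A : List Int) (st : PySem.Dict Int (Int × Int) × (Int × Int × Int × Int))
    (i j : Int) : PySem.Dict Int (Int × Int) × (Int × Int × Int × Int) :=
  let mp := st.1
  let ans := st.2
  match mp.get? (PySem.List.pyGetD A i 0 + PySem.List.pyGetD A j 0) with
  | none => (mp.insert (PySem.List.pyGetD A i 0 + PySem.List.pyGetD A j 0) (i, j), ans)
  | some ab =>
    let a := ab.1
    let b := ab.2
    let c := i
    let d := j
    if a = c ∨ a = d ∨ b = c ∨ b = d then (mp, ans)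
    else (mp,
      if a < ans.1 then (a, b, c, d)
      else if a = ans.1 then
        if b < ans.2.1 then (a, b, c, d)
        else if b = ans.2.1 then
          if c < ans.2.2.1 then (a, b, c, d)
          else if c = ans.2.2.1 then
            if d < ans.2.2.2 then (a, b, c, d) else ans
          else ans
        else ans
      else ans)

def satisfyEqn (A : List Int) (N : Int) : List Int :=
  let st := (PySem.List.pyRange 0 N 1).foldl
    (fun st i => (PySem.List.pyRange (i + 1) N 1).foldl (fun st j => satisfyEqnStep A st i j) st)
    (PySem.Dict.empty, (999, 999, 999, 999))
  let ans := st.2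
  if ans = (999, 999, 999, 999) then [-1, -1, -1, -1]
  else [ans.1, ans.2.1, ans.2.2.1, ans.2.2.2]

-- ===== PORT B =====
-- Python's tuple comparison `cand < best` on 4-tuples of ints (exact lexicographic order)
def lexLt4 (q r : Int × Int × Int × Int) : Bool :=
  q.1 < r.1 || (q.1 == r.1 && (q.2.1 < r.2.1 || (q.2.1 == r.2.1 &&
    (q.2.2.1 < r.2.2.1 || (q.2.2.1 == r.2.2.1 && q.2.2.2 < r.2.2.2)))))

def satisfyEqn_alt (A : List Int) (N : Int) : List Int :=
  -- phase 1: groups.setdefault(A[i]+A[j], []).append((i, j))  =  modify with default []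
  let groups := (PySem.List.pyRange 0 N 1).foldl
    (fun d i => (PySem.List.pyRange (i + 1) N 1).foldl
      (fun d j =>
        d.modify (PySem.List.pyGetD A i 0 + PySem.List.pyGetD A j 0) [] (· ++ [(i, j)])) d)
    PySem.Dict.empty
  -- phase 2: per bucket, anchor pairs[0] against each later pair, keep running lex minimum
  let best := groups.values.foldl
    (fun best l =>
      match l with
      | [] => best  -- unreachable totality guard: every stored bucket is nonempty (pairs[0] in Python)
      | ab :: rest =>
        rest.foldl (fun best p =>
          if ab.1 ≠ p.1 ∧ ab.1 ≠ p.2 ∧ ab.2 ≠ p.1 ∧ ab.2 ≠ p.2 then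
            if lexLt4 (ab.1, ab.2, p.1, p.2) best then (ab.1, ab.2, p.1, p.2) else best
          else best) best)
    ((999 : Int), (999 : Int), (999 : Int), (999 : Int))
  if best ≠ (999, 999, 999, 999) then [best.1, best.2.1, best.2.2.1, best.2.2.2]
  else [-1, -1, -1, -1]

-- ===== PRECONDITION & SPEC =====
-- Pre_ excludes exactly the inputs where A raises IndexError: N ≥ 2 with N > len(A)
-- (the loops then index A at positions up to N-1); B raises there too.
def Pre_satisfyEqn (A : List Int) (N : Int) : Prop :=
  N ≤ (A.length : Int) ∨ N ≤ 1
instance (A : List Int) (N : Int) : Decidable (Pre_satisfyEqn A N) := by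
  unfold Pre_satisfyEqn; infer_instance

def pvWitness_satisfyEqn : List Int × Int := ([0, 1, 2, 3, 4, 5], 6)

def Spec_satisfyEqn (A : List Int) (N : Int) (out : List Int) : Prop := out = satisfyEqn_alt A N
instance (A : List Int) (N : Int) (out : List Int) : Decidable (Spec_satisfyEqn A N out) := by
  unfold Spec_satisfyEqn; infer_instance

-- ===== CLAIM (what is proved, stated in full; the proofs are below) =====
def Claim_equal_satisfyEqn : Prop := ∀ (A : List Int) (N : Int),
  Dom_satisfyEqn A N → Pre_satisfyEqn A N → Spec_satisfyEqn A N (satisfyEqn A N)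

-- ===== LEMMAS AND PROOFS =====

-- proof-only abbreviations
def pvSum (A : List Int) (p : Int × Int) : Int :=
  PySem.List.pyGetD A p.1 0 + PySem.List.pyGetD A p.2 0

def pvPairs (N : Int) : List (Int × Int) :=
  (PySem.List.pyRange 0 N 1).flatMap
    (fun i => (PySem.List.pyRange (i + 1) N 1).map (fun j => (i, j)))

def pvDstep (A : List Int) (d : PySem.Dict Int (Int × Int)) (p : Int × Int) :
    PySem.Dict Int (Int × Int) :=
  match d.get? (pvSum A p) with
  | none => d.insert (pvSum A p) p
  | some _ => d

def pvCandOf (A : List Int) (d : PySem.Dict Int (Int × Int)) (p : Int × Int) :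
    Option (Int × Int × Int × Int) :=
  match d.get? (pvSum A p) with
  | none => none
  | some ab =>
    if ab.1 = p.1 ∨ ab.1 = p.2 ∨ ab.2 = p.1 ∨ ab.2 = p.2 then none
    else some (ab.1, ab.2, p.1, p.2)

def pvMinstep (ans q : Int × Int × Int × Int) : Int × Int × Int × Int :=
  if lexLt4 q ans then q else ans

def pvCandsFrom (A : List Int) (d : PySem.Dict Int (Int × Int)) :
    List (Int × Int) → List (Int × Int × Int × Int)
  | [] => []
  | p :: Q =>
    match pvCandOf A d p with
    | none => pvCandsFrom A (pvDstep A d p) Q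
    | some q => q :: pvCandsFrom A (pvDstep A d p) Q

-- B's bucket of a quadruple list: anchor against each later disjoint pair
def pvQuadOf (ab p : Int × Int) : Option (Int × Int × Int × Int) :=
  if ab.1 = p.1 ∨ ab.1 = p.2 ∨ ab.2 = p.1 ∨ ab.2 = p.2 then none
  else some (ab.1, ab.2, p.1, p.2)

def pvGroupCands : List (Int × Int) → List (Int × Int × Int × Int)
  | [] => []
  | ab :: rest => rest.filterMap (pvQuadOf ab)

-- lexLt4 is a strict linear order
lemma lexLt4_irr (q : Int × Int × Int × Int) : lexLt4 q q = false := by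
  obtain ⟨a, b, c, d⟩ := q; simp [lexLt4]

lemma lexLt4_trans {x y z : Int × Int × Int × Int}
    (h1 : lexLt4 x y = true) (h2 : lexLt4 y z = true) : lexLt4 x z = true := by
  obtain ⟨a, b, c, d⟩ := x; obtain ⟨e, f, g, h⟩ := y; obtain ⟨i, j, k, l⟩ := z
  simp [lexLt4] at *; omega

lemma lexLt4_total {x y : Int × Int × Int × Int}
    (h1 : lexLt4 x y = false) (h2 : lexLt4 y x = false) : x = y := by
  obtain ⟨a, b, c, d⟩ := x; obtain ⟨e, f, g, h⟩ := y
  simp [lexLt4] at *; omega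

-- A's elif tower is one strict-improvement min step
lemma tower_min (a b c d w x y z : Int) :
    (if a < w then ((a, b, c, d) : Int × Int × Int × Int)
     else if a = w then
       if b < x then (a, b, c, d)
       else if b = x then
         if c < y then (a, b, c, d)
         else if c = y then
           if d < z then (a, b, c, d) else (w, x, y, z)
         else (w, x, y, z)
       else (w, x, y, z)
     else (w, x, y, z))
    = pvMinstep (w, x, y, z) (a, b, c, d) := by
  unfold pvMinstep
  have hb : lexLt4 (a, b, c, d) (w, x, y, z) =
      decide (a < w ∨ (a = w ∧ (b < x ∨ (b = x ∧ (c < y ∨ (c = y ∧ d < z)))))) := by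
    refine Bool.eq_iff_iff.mpr ?_
    simp only [lexLt4, Bool.or_eq_true, Bool.and_eq_true, decide_eq_true_eq, beq_iff_eq]
  rw [hb]
  simp only [decide_eq_true_eq]
  split_ifs <;> first | rfl | (exfalso; omega)

lemma satisfyEqnStep_eq (A : List Int) (st : PySem.Dict Int (Int × Int) × (Int × Int × Int × Int))
    (p : Int × Int) :
    satisfyEqnStep A st p.1 p.2 =
      (pvDstep A st.1 p,
        match pvCandOf A st.1 p with
        | none => st.2
        | some q => pvMinstep st.2 q) := by
  obtain ⟨mp, ans⟩ := st
  obtain ⟨i, j⟩ := p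
  dsimp only
  simp only [satisfyEqnStep, pvDstep, pvCandOf, pvSum]
  cases h : mp.get? (PySem.List.pyGetD A i 0 + PySem.List.pyGetD A j 0) with
  | none => simp
  | some ab =>
    obtain ⟨a, b⟩ := ab
    obtain ⟨w, x, y, z⟩ := ans
    by_cases hov : a = i ∨ a = j ∨ b = i ∨ b = j
    · simp [hov]
    · simp only [if_neg hov]
      exact congrArg (Prod.mk mp) (tower_min a b i j w x y z)

-- A's flattened pair loop splits into the dict fold and the min fold over the candidates
lemma foldA_char (A : List Int) (Q : List (Int × Int)) (d : PySem.Dict Int (Int × Int))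
    (ans : Int × Int × Int × Int) :
    Q.foldl (fun st p => satisfyEqnStep A st p.1 p.2) (d, ans)
      = (Q.foldl (pvDstep A) d, (pvCandsFrom A d Q).foldl pvMinstep ans) := by
  induction Q generalizing d ans with
  | nil => rfl
  | cons p Q ih =>
    simp only [List.foldl_cons]
    rw [satisfyEqnStep_eq A (d, ans) p]
    simp only [pvCandsFrom]
    cases h : pvCandOf A d p with
    | none => exact ih _ _
    | some q => exact ih _ _

lemma foldl_inner_flat {α β σ : Type} (l : List α) (g : α → List β) (f : σ → β → σ) (init : σ) :
    l.foldl (fun st x => (g x).foldl f st) init = (l.flatMap g).foldl f init := by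
  induction l generalizing init with
  | nil => rfl
  | cons x l ih => simp [List.flatMap_cons, List.foldl_append, ih]

-- the first-occurrence dict looks up as find? over the processed pairs
lemma get?_dfold (A : List Int) (s : Int) (Q : List (Int × Int)) (d : PySem.Dict Int (Int × Int)) :
    (Q.foldl (pvDstep A) d).get? s = (d.get? s).or (Q.find? (fun p => pvSum A p == s)) := by
  induction Q generalizing d with
  | nil => simp
  | cons p Q ih =>
    rw [List.foldl_cons, ih]
    by_cases hs : pvSum A p = s
    · cases hd : d.get? (pvSum A p) with
      | none =>
        have hfind : (p :: Q).find? (fun q => pvSum A q == s) = some p :=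
          List.find?_cons_of_pos (by simp [hs])
        rw [hfind]
        have : (pvDstep A d p).get? s = some p := by
          simp only [pvDstep, hd]
          rw [← hs, PySem.Dict.get?_insert_self]
        rw [this, ← hs, hd]
        rfl
      | some ab =>
        have hfind : (p :: Q).find? (fun q => pvSum A q == s) = some p :=
          List.find?_cons_of_pos (by simp [hs])
        rw [hfind]
        have hds : d.get? s = some ab := hs ▸ hd
        have : pvDstep A d p = d := by simp [pvDstep, hd]
        rw [this, hds]
        rfl
    · have hfind : (p :: Q).find? (fun q => pvSum A q == s) = Q.find? (fun q => pvSum A q == s) :=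
        List.find?_cons_of_neg (by simp [hs])
      rw [hfind]
      have : (pvDstep A d p).get? s = d.get? s := by
        cases hd : d.get? (pvSum A p) with
        | none => simp only [pvDstep, hd]; rw [PySem.Dict.get?_insert_of_ne _ _ (fun h => hs h.symm)]
        | some ab => simp [pvDstep, hd]
      rw [this]

-- interleaved candidates (prefix dicts) = candidates read off the full dict
lemma cands_prefix (A : List Int) (P : List (Int × Int)) (Q pre : List (Int × Int))
    (h : pre ++ Q = P) :
    pvCandsFrom A (pre.foldl (pvDstep A) PySem.Dict.empty) Q
      = Q.filterMap (pvCandOf A (P.foldl (pvDstep A) PySem.Dict.empty)) := by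
  subst h
  induction Q generalizing pre with
  | nil => simp [pvCandsFrom]
  | cons p Q ih =>
    have hpre : (pre.foldl (pvDstep A) PySem.Dict.empty).get? (pvSum A p)
        = pre.find? (fun q => pvSum A q == pvSum A p) := by
      rw [get?_dfold]; simp
    have hfull : ((pre ++ p :: Q).foldl (pvDstep A) PySem.Dict.empty).get? (pvSum A p)
        = (pre ++ p :: Q).find? (fun q => pvSum A q == pvSum A p) := by
      rw [get?_dfold]; simp
    have hhead : pvCandOf A (pre.foldl (pvDstep A) PySem.Dict.empty) p
        = pvCandOf A ((pre ++ p :: Q).foldl (pvDstep A) PySem.Dict.empty) p := by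
      cases hp : pre.find? (fun q => pvSum A q == pvSum A p) with
      | some ab =>
        have h2 : (pre ++ p :: Q).find? (fun q => pvSum A q == pvSum A p) = some ab := by
          rw [List.find?_append, hp]; rfl
        unfold pvCandOf
        rw [hpre, hfull, hp, h2]
      | none =>
        have h2 : (pre ++ p :: Q).find? (fun q => pvSum A q == pvSum A p) = some p := by
          rw [List.find?_append, hp]
          simp [List.find?_cons_of_pos]
        unfold pvCandOf
        rw [hpre, hfull, hp, h2]
        simp
    have htail := ih (pre ++ [p])
    rw [List.append_assoc] at htail
    simp only [List.singleton_append] at htail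
    rw [List.foldl_append, List.foldl_cons, List.foldl_nil] at htail
    rw [List.filterMap_cons]
    cases hc : pvCandOf A ((pre ++ p :: Q).foldl (pvDstep A) PySem.Dict.empty) p with
    | none =>
      simp only [pvCandsFrom, hhead, hc]
      exact htail
    | some q =>
      simp only [pvCandsFrom, hhead, hc]
      rw [htail]

-- the nested running-min fold result is an element of init :: candidates …
lemma fmin_mem (l : List (Int × Int × Int × Int)) (init : Int × Int × Int × Int) :
    l.foldl pvMinstep init = init ∨ l.foldl pvMinstep init ∈ l := by
  induction l generalizing init with
  | nil => left; rfl
  | cons q l ih =>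
    rw [List.foldl_cons]
    rcases ih (pvMinstep init q) with h | h
    · rw [h]
      unfold pvMinstep
      split_ifs
      · right; exact List.mem_cons_self
      · left; rfl
    · right; exact List.mem_cons_of_mem _ h

-- … and no element of init :: candidates is lexicographically below it
lemma fmin_min (l : List (Int × Int × Int × Int)) (init x : Int × Int × Int × Int)
    (hx : x = init ∨ x ∈ l) : lexLt4 x (l.foldl pvMinstep init) = false := by
  induction l generalizing init x with
  | nil =>
    rcases hx with rfl | h
    · exact lexLt4_irr _
    · simp at h
  | cons q l ih =>
    rw [List.foldl_cons]
    have hres : ∀ y, y = pvMinstep init q ∨ y ∈ l → lexLt4 y (l.foldl pvMinstep (pvMinstep init q)) = false :=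
      fun y hy => ih (pvMinstep init q) y hy
    rcases hx with rfl | hx
    · by_cases hq : lexLt4 q x = true
      · have h1 : lexLt4 q (l.foldl pvMinstep (pvMinstep x q)) = false :=
          hres q (Or.inl (by simp [pvMinstep, hq]))
        cases hxr : lexLt4 x (l.foldl pvMinstep (pvMinstep x q)) with
        | false => rfl
        | true => exact absurd (lexLt4_trans hq hxr) (by simp [h1])
      · exact hres x (Or.inl (by simp [pvMinstep, hq]))
    · rw [List.mem_cons] at hx
      rcases hx with rfl | hx
      · by_cases hq' : lexLt4 x init = true
        · exact hres x (Or.inl (by simp [pvMinstep, hq']))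
        · have h1 : lexLt4 init (l.foldl pvMinstep (pvMinstep init x)) = false :=
            hres init (Or.inl (by simp [pvMinstep, hq']))
          cases hxr : lexLt4 x (l.foldl pvMinstep (pvMinstep init x)) with
          | false => rfl
          | true =>
            exfalso
            cases hio : lexLt4 init x with
            | true => exact absurd (lexLt4_trans hio hxr) (by simp [h1])
            | false =>
              have hxi : x = init := lexLt4_total (by simpa using hq') hio
              rw [hxi] at hxr h1
              simp [h1] at hxr
      · exact hres x (Or.inr hx)

-- the running minimum depends only on WHICH candidates occur, not on their order
lemma fmin_eq_of_mem_iff (l1 l2 : List (Int × Int × Int × Int)) (init : Int × Int × Int × Int)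
    (h : ∀ x, x ∈ l1 ↔ x ∈ l2) : l1.foldl pvMinstep init = l2.foldl pvMinstep init := by
  have h1 : l1.foldl pvMinstep init = init ∨ l1.foldl pvMinstep init ∈ l2 := by
    rcases fmin_mem l1 init with hm | hm
    · exact Or.inl hm
    · exact Or.inr ((h _).mp hm)
  have h2 : l2.foldl pvMinstep init = init ∨ l2.foldl pvMinstep init ∈ l1 := by
    rcases fmin_mem l2 init with hm | hm
    · exact Or.inl hm
    · exact Or.inr ((h _).mpr hm)
  exact lexLt4_total (fmin_min l2 init _ h1) (fmin_min l1 init _ h2)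

-- B's inner conditional fold is the min fold over the bucket's candidate list
lemma foldB_inner (ab : Int × Int) (rest : List (Int × Int)) (best : Int × Int × Int × Int) :
    rest.foldl (fun best p =>
        if ab.1 ≠ p.1 ∧ ab.1 ≠ p.2 ∧ ab.2 ≠ p.1 ∧ ab.2 ≠ p.2 then
          if lexLt4 (ab.1, ab.2, p.1, p.2) best then (ab.1, ab.2, p.1, p.2) else best
        else best) best
      = (rest.filterMap (pvQuadOf ab)).foldl pvMinstep best := by
  induction rest generalizing best with
  | nil => rfl
  | cons p rest ih =>
    rw [List.foldl_cons, List.filterMap_cons]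
    by_cases hov : ab.1 = p.1 ∨ ab.1 = p.2 ∨ ab.2 = p.1 ∨ ab.2 = p.2
    · rw [if_neg (by tauto)]
      simp only [pvQuadOf, if_pos hov]
      exact ih best
    · rw [if_pos (by tauto)]
      simp only [pvQuadOf, if_neg hov, List.foldl_cons]
      exact ih (pvMinstep best (ab.1, ab.2, p.1, p.2))

-- ===== VERDICT helper facts about B's grouping dict =====

def pvGdict (A : List Int) (N : Int) : PySem.Dict Int (List (Int × Int)) :=
  (pvPairs N).foldl (fun d p => d.modify (pvSum A p) [] (· ++ [p])) PySem.Dict.empty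

lemma gdict_getD (A : List Int) (N : Int) (s : Int) :
    (pvGdict A N).getD s [] = (pvPairs N).filter (fun p => pvSum A p == s) := by
  unfold pvGdict
  have h := PySem.Dict.getD_foldl_modify_append
    (l := (pvPairs N).map (fun p => (pvSum A p, p))) (d := PySem.Dict.empty) (c := s)
  rw [List.foldl_map] at h
  simp only [PySem.Dict.getD_empty, List.nil_append] at h
  rw [h, List.filter_map, List.map_map]
  simp [Function.comp_def]

lemma gdict_keys_mem (A : List Int) (N : Int) (s : Int) :
    s ∈ (pvGdict A N).keys ↔ ∃ p ∈ pvPairs N, pvSum A p = s := by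
  unfold pvGdict
  rw [PySem.Dict.keys_foldl_modify_key (key := pvSum A)]
  simp only [PySem.Dict.keys_empty, PySem.Set.update_nil_left]
  rw [PySem.Set.mem_ofList]
  simp [eq_comm]

lemma gdict_nodup (A : List Int) (N : Int) : (pvGdict A N).keys.Nodup := by
  unfold pvGdict
  exact PySem.Dict.nodup_keys_foldl_modify_key _ _ _ _ _ PySem.Dict.nodup_keys_empty

-- membership in A's candidate list = membership in B's bucketed candidate list
lemma mem_cands_iff (A : List Int) (N : Int) (x : Int × Int × Int × Int) :
    x ∈ (pvPairs N).filterMap (pvCandOf A ((pvPairs N).foldl (pvDstep A) PySem.Dict.empty))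
      ↔ x ∈ (pvGdict A N).values.flatMap pvGroupCands := by
  have hget : ∀ p : Int × Int,
      ((pvPairs N).foldl (pvDstep A) PySem.Dict.empty).get? (pvSum A p)
        = (pvPairs N).find? (fun q => pvSum A q == pvSum A p) := by
    intro p; rw [get?_dfold]; simp
  have hvals : (pvGdict A N).values
      = (pvGdict A N).keys.map (fun k => (pvGdict A N).getD k []) :=
    PySem.Dict.values_eq_map_keys _ (gdict_nodup A N) []
  constructor
  · -- A candidate → B candidate
    intro hx
    rw [List.mem_filterMap] at hx
    obtain ⟨p, hp, hc⟩ := hx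
    unfold pvCandOf at hc
    rw [hget p] at hc
    cases hf : (pvPairs N).find? (fun q => pvSum A q == pvSum A p) with
    | none => rw [hf] at hc; simp at hc
    | some ab =>
      rw [hf] at hc
      dsimp only at hc
      by_cases hov : ab.1 = p.1 ∨ ab.1 = p.2 ∨ ab.2 = p.1 ∨ ab.2 = p.2
      · rw [if_pos hov] at hc; simp at hc
      · rw [if_neg hov] at hc
        have hx' : x = (ab.1, ab.2, p.1, p.2) := (Option.some.inj hc).symm
        -- the bucket of s := pvSum A p is the filter, with head ab
        have hfilter : ((pvPairs N).filter (fun q => pvSum A q == pvSum A p)).head? = some ab := by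
          rw [List.head?_filter, hf]
        have hpfil : p ∈ (pvPairs N).filter (fun q => pvSum A q == pvSum A p) := by
          rw [List.mem_filter]; exact ⟨hp, by simp⟩
        rw [List.mem_flatMap]
        refine ⟨(pvGdict A N).getD (pvSum A p) [], ?_, ?_⟩
        · rw [hvals, List.mem_map]
          exact ⟨pvSum A p, (gdict_keys_mem A N _).mpr ⟨p, hp, rfl⟩, rfl⟩
        · rw [gdict_getD]
          cases hfl : (pvPairs N).filter (fun q => pvSum A q == pvSum A p) with
          | nil => rw [hfl] at hpfil; simp at hpfil
          | cons hd tl =>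
            have hhd : hd = ab := by rw [hfl] at hfilter; exact Option.some.inj hfilter
            subst hhd
            have hptl : p ∈ tl := by
              rw [hfl] at hpfil
              rcases List.mem_cons.mp hpfil with rfl | h
              · exact absurd (Or.inl rfl) hov
              · exact h
            simp only [pvGroupCands]
            rw [List.mem_filterMap]
            exact ⟨p, hptl, by simp [pvQuadOf, hov, hx']⟩
  · -- B candidate → A candidate
    intro hx
    rw [List.mem_flatMap] at hx
    obtain ⟨l, hl, hxl⟩ := hx
    rw [hvals, List.mem_map] at hl
    obtain ⟨s, hs, rfl⟩ := hl
    rw [gdict_getD] at hxl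
    cases hfl : (pvPairs N).filter (fun q => pvSum A q == s) with
    | nil => rw [hfl] at hxl; simp [pvGroupCands] at hxl
    | cons ab tl =>
      rw [hfl] at hxl
      simp only [pvGroupCands] at hxl
      rw [List.mem_filterMap] at hxl
      obtain ⟨p, hptl, hq⟩ := hxl
      have hpfil : p ∈ (pvPairs N).filter (fun q => pvSum A q == s) := by
        rw [hfl]; exact List.mem_cons_of_mem _ hptl
      rw [List.mem_filter] at hpfil
      obtain ⟨hp, hps⟩ := hpfil
      have hps' : pvSum A p = s := by simpa using hps
      unfold pvQuadOf at hq
      by_cases hov : ab.1 = p.1 ∨ ab.1 = p.2 ∨ ab.2 = p.1 ∨ ab.2 = p.2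
      · rw [if_pos hov] at hq; simp at hq
      · rw [if_neg hov] at hq
        rw [List.mem_filterMap]
        refine ⟨p, hp, ?_⟩
        unfold pvCandOf
        rw [hget p]
        have hfind : (pvPairs N).find? (fun q => pvSum A q == pvSum A p) = some ab := by
          rw [← List.head?_filter]
          have : (fun q => pvSum A q == pvSum A p) = (fun q => pvSum A q == s) := by
            funext q; rw [hps']
          rw [this, hfl]
          rfl
        rw [hfind]
        dsimp only
        rw [if_neg hov]
        exact hq

-- ===== VERDICT (by name: the statement is the Claim_ definition above) =====
theorem satisfyEqn_spec : Claim_equal_satisfyEqn := by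
  intro A N _hDom _hPre
  unfold Spec_satisfyEqn
  -- A's result as a min fold over its candidate list
  have hA : satisfyEqn A N =
      (let m := ((pvPairs N).filterMap
          (pvCandOf A ((pvPairs N).foldl (pvDstep A) PySem.Dict.empty))).foldl pvMinstep (999, 999, 999, 999)
       if m = (999, 999, 999, 999) then [-1, -1, -1, -1]
       else [m.1, m.2.1, m.2.2.1, m.2.2.2]) := by
    unfold satisfyEqn
    have h1 : (PySem.List.pyRange 0 N 1).foldl
        (fun st i => (PySem.List.pyRange (i + 1) N 1).foldl (fun st j => satisfyEqnStep A st i j) st)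
        (PySem.Dict.empty, ((999 : Int), (999 : Int), (999 : Int), (999 : Int)))
        = (pvPairs N).foldl (fun st p => satisfyEqnStep A st p.1 p.2)
            (PySem.Dict.empty, (999, 999, 999, 999)) := by
      unfold pvPairs
      rw [← foldl_inner_flat]
      simp only [List.foldl_map]
    have h2 := cands_prefix A (pvPairs N) (pvPairs N) [] rfl
    simp only [List.foldl_nil] at h2
    rw [h1, foldA_char, h2]
  -- B's result as a min fold over its bucketed candidate list
  have hB : satisfyEqn_alt A N =
      (let m := ((pvGdict A N).values.flatMap pvGroupCands).foldl pvMinstep (999, 999, 999, 999)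
       if m = (999, 999, 999, 999) then [-1, -1, -1, -1]
       else [m.1, m.2.1, m.2.2.1, m.2.2.2]) := by
    unfold satisfyEqn_alt
    have hg : (PySem.List.pyRange 0 N 1).foldl
        (fun d i => (PySem.List.pyRange (i + 1) N 1).foldl
          (fun d j =>
            d.modify (PySem.List.pyGetD A i 0 + PySem.List.pyGetD A j 0) [] (· ++ [(i, j)])) d)
        PySem.Dict.empty = pvGdict A N := by
      unfold pvGdict pvPairs
      rw [← foldl_inner_flat]
      simp only [List.foldl_map]
      rfl
    rw [hg]
    have hbody : (fun (best : Int × Int × Int × Int) (l : List (Int × Int)) =>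
        match l with
        | [] => best
        | ab :: rest =>
          rest.foldl (fun best p =>
            if ab.1 ≠ p.1 ∧ ab.1 ≠ p.2 ∧ ab.2 ≠ p.1 ∧ ab.2 ≠ p.2 then
              if lexLt4 (ab.1, ab.2, p.1, p.2) best then (ab.1, ab.2, p.1, p.2) else best
            else best) best)
        = (fun best l => (pvGroupCands l).foldl pvMinstep best) := by
      funext best l
      cases l with
      | nil => rfl
      | cons ab rest => exact foldB_inner ab rest best
    simp only [hbody]
    rw [foldl_inner_flat]
    by_cases hm : ((pvGdict A N).values.flatMap pvGroupCands).foldl pvMinstep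
        ((999 : Int), (999 : Int), (999 : Int), (999 : Int)) = (999, 999, 999, 999)
    · simp [hm]
    · simp [hm]
  rw [hA, hB,
    fmin_eq_of_mem_iff _ _ (999, 999, 999, 999) (fun x => mem_cands_iff A N x)]
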